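-- pv_equiv track=rewrite | github.com/NapoleonBonatarte/Huffman_codes | huffman_code_functions.py | codes_to_chunks
-- ===== SOURCE A (Python) =====
-- def codes_to_chunks(codes):
--     all_nums = ''
--     retarr = []
--     tempval = ''
--     for i in codes:
--         for j in i:
--             all_nums += j
--     for bit in all_nums:
--         tempval += bit
--         if len(tempval) == 8:
--             retarr.append(tempval)
--             tempval = ''
--     if len(tempval) > 0:
--         retarr.append(tempval + '0' * (8 - len(tempval)))
--     return retarr
-- ===== SOURCE B (Python) =====
-- def codes_to_chunks(codes):
--     s = ''.join(codes)
--     s += '0' * (-len(s) % 8)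
--     return [s[i:i + 8] for i in range(0, len(s), 8)]
-- ===== Notes on version B (the rewrite author's own statement) =====
-- stated objective: faster
-- what changed: Replaces the per-character counter loop and trailing-remainder branch with one join, a single upfront pad computation (-len % 8) and stride-8 slicing, avoiding per-character Python-level string concatenation.
import Mathlib
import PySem

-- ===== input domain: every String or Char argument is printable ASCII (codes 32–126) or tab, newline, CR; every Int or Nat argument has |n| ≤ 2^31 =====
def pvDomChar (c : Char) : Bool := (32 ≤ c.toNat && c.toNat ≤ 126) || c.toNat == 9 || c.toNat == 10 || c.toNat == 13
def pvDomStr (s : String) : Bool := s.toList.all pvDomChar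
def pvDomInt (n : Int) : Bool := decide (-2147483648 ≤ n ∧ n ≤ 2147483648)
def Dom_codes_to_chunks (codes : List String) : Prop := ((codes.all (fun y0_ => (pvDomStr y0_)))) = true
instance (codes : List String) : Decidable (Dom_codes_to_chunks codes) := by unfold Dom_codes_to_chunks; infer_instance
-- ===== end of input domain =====

-- B replaces A's per-character chunk counter and remainder branch with one join, an upfront
-- pad of (-len % 8) zeros and stride-8 slicing (objective: simpler).

-- ===== PORT A =====
-- strings are handled as List Char (PySem convention); String.ofList at append points
def codes_to_chunks (codes : List String) : List String :=
  let all_nums : List Char :=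
    codes.foldl (fun acc i => i.toList.foldl (fun a j => a ++ [j]) acc) []
  let st : List String × List Char :=
    all_nums.foldl (fun (p : List String × List Char) bit =>
      let tempval := p.2 ++ [bit]
      if tempval.length = 8 then (p.1 ++ [String.ofList tempval], []) else (p.1, tempval))
      ([], [])
  if st.2.length > 0 then
    st.1 ++ [String.ofList (st.2 ++ List.replicate (8 - st.2.length) '0')]
  else st.1

-- ===== PORT B =====
def codes_to_chunks_alt (codes : List String) : List String :=
  let s0 : List Char := (codes.map String.toList).flatten      -- ''.join(codes)
  let s : List Char :=
    s0 ++ List.replicate ((PySem.Int.mod (-(s0.length : Int)) 8).toNat) '0'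
  (PySem.List.pyRange 0 (s.length : Int) 8).map
    (fun i => String.ofList (PySem.List.slice s (some i) (some (i + 8))))

-- ===== PRECONDITION & SPEC =====
def Spec_codes_to_chunks (codes : List String) (out : List String) : Prop := out = codes_to_chunks_alt codes
instance (codes : List String) (out : List String) : Decidable (Spec_codes_to_chunks codes out) := by unfold Spec_codes_to_chunks; infer_instance

-- ===== CLAIM (what is proved, stated in full; the proofs are below) =====
def Claim_equal_codes_to_chunks : Prop := ∀ (codes : List String), Dom_codes_to_chunks codes → Spec_codes_to_chunks codes (codes_to_chunks codes)

-- ===== LEMMAS AND PROOFS =====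

-- reference chunker: successive 8-blocks, last block zero-padded
def chunksC (l : List Char) : List String :=
  if l.length = 0 then []
  else if 8 ≤ l.length then String.ofList (l.take 8) :: chunksC (l.drop 8)
  else [String.ofList (l ++ List.replicate (8 - l.length) '0')]
  termination_by l.length
  decreasing_by simp; omega

-- A's loop body and finishing branch, named for the lemmas
def stepA (p : List String × List Char) (bit : Char) : List String × List Char :=
  let tempval := p.2 ++ [bit]
  if tempval.length = 8 then (p.1 ++ [String.ofList tempval], []) else (p.1, tempval)

def finishA (p : List String × List Char) : List String :=
  if p.2.length > 0 then p.1 ++ [String.ofList (p.2 ++ List.replicate (8 - p.2.length) '0')]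
  else p.1

theorem foldl_append_singleton (l : List Char) (acc : List Char) :
    l.foldl (fun a j => a ++ [j]) acc = acc ++ l := by
  induction l generalizing acc with
  | nil => simp
  | cons x xs ih => simp [List.foldl_cons, ih]

theorem allnums_eq (codes : List String) :
    codes.foldl (fun acc i => i.toList.foldl (fun a j => a ++ [j]) acc) [] =
      (codes.map String.toList).flatten := by
  suffices h : ∀ (cs : List String) (acc : List Char),
      cs.foldl (fun acc i => i.toList.foldl (fun a j => a ++ [j]) acc) acc =
        acc ++ (cs.map String.toList).flatten by
    simpa using h codes []
  intro cs
  induction cs with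
  | nil => simp
  | cons c cs ih =>
    intro acc
    rw [List.foldl_cons, foldl_append_singleton, ih]
    simp

-- A's chunking fold, with its finishing branch, computes chunksC
theorem foldl_chunk (l : List Char) (acc : List String) (t : List Char)
    (ht : t.length < 8) :
    finishA (l.foldl stepA (acc, t)) = acc ++ chunksC (t ++ l) := by
  induction l generalizing acc t with
  | nil =>
    rw [List.foldl_nil, List.append_nil]
    by_cases h0 : t.length = 0
    · have : t = [] := List.eq_nil_of_length_eq_zero h0
      subst this
      simp [finishA, chunksC]
    · rw [chunksC, if_neg h0, if_neg (by omega)]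
      simp only [finishA]
      rw [if_pos (by omega)]
  | cons b l' ih =>
    rw [List.foldl_cons]
    by_cases h8 : (t ++ [b]).length = 8
    · have hstep : stepA (acc, t) b = (acc ++ [String.ofList (t ++ [b])], []) := by
        simp only [stepA, h8]; rfl
      rw [hstep, ih _ [] (by simp)]
      have hlen8 : (t ++ [b]).length = 8 := h8
      have hlen : 8 ≤ ((t ++ [b]) ++ l').length := by simp at hlen8 ⊢; omega
      have htk : ((t ++ [b]) ++ l').take 8 = t ++ [b] := by
        rw [List.take_append_of_le_length (by omega)]
        exact List.take_of_length_le (by omega)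
      have hdr : ((t ++ [b]) ++ l').drop 8 = l' := by
        rw [List.drop_append_of_le_length (by omega)]
        simp [hlen8]
      have hch : chunksC ((t ++ [b]) ++ l') = String.ofList (t ++ [b]) :: chunksC l' := by
        conv_lhs => rw [chunksC]
        rw [if_neg (by omega), if_pos hlen, htk, hdr]
      have hcons : t ++ b :: l' = (t ++ [b]) ++ l' := by simp
      rw [hcons, hch]
      simp
    · have hstep : stepA (acc, t) b = (acc, t ++ [b]) := by
        simp only [stepA, h8]; rfl
      have hlt : (t ++ [b]).length < 8 := by simp at h8 ⊢; omega
      rw [hstep, ih _ _ hlt]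
      simp

theorem codes_to_chunks_eq_chunksC (codes : List String) :
    codes_to_chunks codes = chunksC ((codes.map String.toList).flatten) := by
  have hport : codes_to_chunks codes =
      finishA (((codes.map String.toList).flatten).foldl stepA ([], [])) := by
    unfold codes_to_chunks finishA stepA
    rw [allnums_eq]
  rw [hport, foldl_chunk _ [] [] (by simp)]
  simp

-- slicing helper: s[8k : 8k+8] = (s.drop (8k)).take 8
theorem slice8 (s : List Char) (i : Int) (k : Nat) (hik : i = 8 * (k : Int)) :
    PySem.List.slice s (some i) (some (i + 8)) = (s.drop (8 * k)).take 8 := by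
  subst hik
  rw [PySem.List.slice_toNat]
  have h1 : (8 * (k:Int)).toNat = 8 * k := by omega
  have h2 : (8 * (k:Int) + 8).toNat = 8 * k + 8 := by omega
  rw [h1, h2]
  congr 1
  omega
  all_goals omega

-- B's stride-8 slicing over a length-8m list is chunksC
theorem slices_eq_chunksC (m : Nat) : ∀ (s : List Char), s.length = 8 * m →
    (PySem.List.pyRange 0 (s.length : Int) 8).map
      (fun i => String.ofList (PySem.List.slice s (some i) (some (i + 8)))) = chunksC s := by
  induction m with
  | zero =>
    intro s hs
    have : s = [] := List.eq_nil_of_length_eq_zero (by omega)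
    subst this
    rw [chunksC]
    simp [PySem.List.pyRange]
  | succ m ih =>
    intro s hs
    rw [PySem.List.pyRange_of_pos _ _ (by norm_num)]
    have hcount : (if (0:Int) < (s.length : Int) then
        (((s.length : Int) - 0 + 8 - 1) / 8).toNat else 0) = m + 1 := by
      rw [hs]; split_ifs with h <;> push_cast at * <;> omega
    rw [hcount, List.range_succ_eq_map, List.map_cons, List.map_map]
    have hfirst : String.ofList (PySem.List.slice s (some ((0:Int) + 8 * ((0:Nat) : Int)))
        (some ((0:Int) + 8 * ((0:Nat) : Int) + 8))) = String.ofList (s.take 8) := by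
      rw [slice8 s _ 0 (by norm_num)]
      simp
    have hdroplen : (s.drop 8).length = 8 * m := by rw [List.length_drop, hs]; omega
    have ihd := ih (s.drop 8) hdroplen
    rw [PySem.List.pyRange_of_pos _ _ (by norm_num)] at ihd
    have hcount' : (if (0:Int) < ((s.drop 8).length : Int) then
        ((((s.drop 8).length : Int) - 0 + 8 - 1) / 8).toNat else 0) = m := by
      rw [hdroplen]; split_ifs with h <;> push_cast at * <;> omega
    rw [hcount'] at ihd
    conv_rhs => rw [chunksC]
    rw [if_neg (by omega), if_pos (by omega)]
    rw [List.map_cons, hfirst]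
    congr 1
    rw [List.map_map, ← ihd, List.map_map]
    apply List.map_congr_left
    intro k _
    simp only [Function.comp, Nat.succ_eq_add_one]
    rw [slice8 s _ (k + 1) (by omega), slice8 (s.drop 8) _ k (by omega)]
    rw [List.drop_drop]
    have h18 : 8 * (k + 1) = 8 + 8 * k := by omega
    rw [h18]

-- padding to the next multiple of 8 does not change chunksC
theorem chunksC_pad (n : Nat) : ∀ (s : List Char), s.length = n →
    ∀ (p : Nat), (s.length + p) % 8 = 0 → p < 8 →
    chunksC (s ++ List.replicate p '0') = chunksC s := by
  induction n using Nat.strong_induction_on with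
  | _ n ih =>
    intro s hs p hp hp8
    by_cases h8 : 8 ≤ s.length
    · rw [chunksC]
      rw [if_neg (by rw [List.length_append, List.length_replicate]; omega),
          if_pos (by rw [List.length_append, List.length_replicate]; omega)]
      conv_rhs => rw [chunksC]
      rw [if_neg (by omega), if_pos h8]
      have htk : (s ++ List.replicate p '0').take 8 = s.take 8 :=
        List.take_append_of_le_length h8
      have hdr : (s ++ List.replicate p '0').drop 8 = s.drop 8 ++ List.replicate p '0' :=
        List.drop_append_of_le_length h8
      rw [htk, hdr]
      rw [ih (s.drop 8).length (by rw [List.length_drop]; omega) (s.drop 8) rfl p (by rw [List.length_drop]; omega) hp8]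
    · by_cases hnil : s.length = 0
      · have : s = [] := List.eq_nil_of_length_eq_zero hnil
        subst this
        have : p = 0 := by simp at hp; omega
        subst this; simp
      · have hplen : p = 8 - s.length := by omega
        rw [chunksC]
        rw [if_neg (by rw [List.length_append, List.length_replicate]; omega),
            if_pos (by rw [List.length_append, List.length_replicate]; omega)]
        rw [List.take_of_length_le (by rw [List.length_append, List.length_replicate]; omega),
            List.drop_eq_nil_of_le (by rw [List.length_append, List.length_replicate]; omega)]
        rw [chunksC]
        simp only [List.length_nil]
        rw [if_true]
        conv_rhs => rw [chunksC]
        rw [if_neg hnil, if_neg (by omega)]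
        rw [hplen]

theorem codes_to_chunks_alt_eq_chunksC (codes : List String) :
    codes_to_chunks_alt codes = chunksC ((codes.map String.toList).flatten) := by
  unfold codes_to_chunks_alt
  set s0 : List Char := (codes.map String.toList).flatten with hs0
  set p : Nat := (PySem.Int.mod (-(s0.length : Int)) 8).toNat with hpdef
  have hmod : PySem.Int.mod (-(s0.length : Int)) 8 = (-(s0.length : Int)) % 8 :=
    PySem.Int.mod_eq_emod_of_pos (by norm_num)
  have hnn : 0 ≤ (-(s0.length : Int)) % 8 := Int.emod_nonneg _ (by norm_num)
  have hlt : (-(s0.length : Int)) % 8 < 8 := Int.emod_lt_of_pos _ (by norm_num)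
  have hp8 : p < 8 := by rw [hpdef, hmod]; omega
  have hpc : (p : Int) = (-(s0.length : Int)) % 8 := by rw [hpdef, hmod]; omega
  have hsum : (s0.length + p) % 8 = 0 := by omega
  have hdvd : 8 ∣ (s0 ++ List.replicate p '0').length := by rw [List.length_append, List.length_replicate]; omega
  obtain ⟨m, hm⟩ := hdvd
  rw [slices_eq_chunksC m _ hm]
  exact chunksC_pad s0.length s0 rfl p hsum hp8

-- ===== VERDICT (by name: the statement is the Claim_ definition above) =====
theorem codes_to_chunks_spec : Claim_equal_codes_to_chunks := by
  intro codes _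
  unfold Spec_codes_to_chunks
  rw [codes_to_chunks_eq_chunksC, codes_to_chunks_alt_eq_chunksC]
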